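-- pv_equiv track=rewrite | github.com/Blonck/ciq | cracking_the_coding_interview/2_4_partition_list/partition_list.py | is_partitioned
-- ===== SOURCE A (Python) =====
-- def is_partitioned(lst, val):
--     if not lst:
--         return True
--
--     # Finding the partition index
--     partition_index = None
--     for i, value in enumerate(lst):
--         if value > val:
--             partition_index = i
--             break
--
--     # If all elements are less than or equal to the partition value
--     if partition_index is None:
--         return True
--
--     # Check if all elements after the partition index are greater than the partition value
--     return all(value > val for value in lst[partition_index:])
-- ===== SOURCE B (Python) =====
-- def is_partitioned(lst, val):
--     flags = [x > val for x in lst]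
--     return flags == sorted(flags)
-- ===== Notes on version B (the rewrite author's own statement) =====
-- stated objective: alternative
-- what changed: Replaces A's boundary search plus suffix-slice verification with a declarative check: map each element to the boolean flag x > val and test whether that flag list equals its sorted version (partitioned iff the flags are nondecreasing).
import Mathlib
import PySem

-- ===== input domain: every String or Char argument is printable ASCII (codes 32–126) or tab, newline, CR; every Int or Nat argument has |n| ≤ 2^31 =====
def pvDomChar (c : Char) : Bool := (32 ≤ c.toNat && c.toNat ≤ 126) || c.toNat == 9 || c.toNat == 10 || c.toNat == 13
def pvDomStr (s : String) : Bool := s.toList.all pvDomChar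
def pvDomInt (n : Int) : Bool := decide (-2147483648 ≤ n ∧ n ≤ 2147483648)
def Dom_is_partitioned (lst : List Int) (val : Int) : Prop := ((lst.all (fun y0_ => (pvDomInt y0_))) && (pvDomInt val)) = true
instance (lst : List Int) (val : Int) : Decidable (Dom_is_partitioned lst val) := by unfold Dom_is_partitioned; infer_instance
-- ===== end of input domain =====

-- B replaces A's boundary search plus suffix-slice check with a declarative test:
-- map each element to the flag (x > val) and check the flag list equals its sorted
-- version (partitioned iff the flags are nondecreasing); objective: alternative.

-- ===== PORT A =====
-- the enumerate-loop with break: returns the first index i with lst[i] > val, else none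
def pvFindPartIdx (lst : List Int) (val : Int) (i : Nat) : Option Nat :=
  match lst with
  | [] => none
  | x :: xs => if x > val then some i else pvFindPartIdx xs val (i + 1)

def is_partitioned (lst : List Int) (val : Int) : Bool :=
  if lst.isEmpty then true
  else
    match pvFindPartIdx lst val 0 with
    | none => true
    | some i =>
      -- lst[partition_index:] : i is a loop index, 0 ≤ i ≤ len lst, so the slice is List.drop i (exact here)
      (List.drop i lst).all (fun value => value > val)

-- ===== PORT B =====
def is_partitioned_alt (lst : List Int) (val : Int) : Bool :=
  let flags := lst.map (fun x => decide (x > val))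
  decide (flags = PySem.List.sorted flags (fun b => b) false)

-- ===== PRECONDITION & SPEC =====
def Spec_is_partitioned (lst : List Int) (val : Int) (out : Bool) : Prop := out = is_partitioned_alt lst val
instance (lst : List Int) (val : Int) (out : Bool) : Decidable (Spec_is_partitioned lst val out) := by unfold Spec_is_partitioned; infer_instance

-- ===== CLAIM =====
def Claim_equal_is_partitioned : Prop := ∀ (lst : List Int) (val : Int), Dom_is_partitioned lst val → Spec_is_partitioned lst val (is_partitioned lst val)

-- ===== LEMMAS AND PROOFS =====

lemma pvFindPartIdx_shift (lst : List Int) (val : Int) (n : Nat) :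
    pvFindPartIdx lst val n = (pvFindPartIdx lst val 0).map (· + n) := by
  induction lst generalizing n with
  | nil => simp [pvFindPartIdx]
  | cons x xs ih =>
    simp only [pvFindPartIdx]
    by_cases h : x > val
    · simp [h]
    · simp [h, ih (n + 1), ih 1, Option.map_map]
      rcases pvFindPartIdx xs val 0 with _ | j <;> simp
      omega

lemma pvA_cons_gt (x : Int) (xs : List Int) (val : Int) (h : x > val) :
    is_partitioned (x :: xs) val = (x :: xs).all (fun v => decide (v > val)) := by
  simp [is_partitioned, pvFindPartIdx, h]

lemma pvA_cons_le (x : Int) (xs : List Int) (val : Int) (h : ¬ x > val) :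
    is_partitioned (x :: xs) val = is_partitioned xs val := by
  rcases xs with _ | ⟨y, ys⟩
  · simp [is_partitioned, pvFindPartIdx, h]
  · unfold is_partitioned
    simp only [List.isEmpty_cons, Bool.false_eq_true, ite_false]
    have hstep : pvFindPartIdx (x :: y :: ys) val 0 = pvFindPartIdx (y :: ys) val 1 := by
      conv_lhs => rw [pvFindPartIdx]
      rw [if_neg h]
    rw [hstep, pvFindPartIdx_shift (y :: ys) val 1]
    rcases hf : pvFindPartIdx (y :: ys) val 0 with _ | j
    · rfl
    · simp

lemma pvAllTrue_pairwise (fs : List Bool) (h : ∀ b ∈ fs, b = true) :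
    fs.Pairwise (fun a b => a ≤ b) := by
  induction fs with
  | nil => simp
  | cons a t ih =>
    refine List.pairwise_cons.mpr ⟨fun b hb => ?_, ih (fun b hb => h b (List.mem_cons_of_mem _ hb))⟩
    rw [h b (List.mem_cons_of_mem _ hb)]
    exact Bool.le_true a

-- A's result characterised as monotonicity of the flag list
lemma pvA_iff (lst : List Int) (val : Int) :
    is_partitioned lst val = true ↔
      (lst.map (fun x => decide (x > val))).Pairwise (fun a b => a ≤ b) := by
  induction lst with
  | nil => simp [is_partitioned]
  | cons x xs ih =>
    by_cases h : x > val
    · rw [pvA_cons_gt x xs val h]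
      constructor
      · intro hall
        refine pvAllTrue_pairwise _ (fun b hb => ?_)
        simp only [List.mem_map] at hb
        obtain ⟨y, hy, rfl⟩ := hb
        simp only [List.all_eq_true, decide_eq_true_eq] at hall
        simp [hall y hy]
      · intro hp
        have hflag : decide (x > val) = true := by simpa using h
        simp only [List.map_cons, hflag, List.pairwise_cons] at hp
        simp only [List.all_eq_true, decide_eq_true_eq]
        intro y hy
        rcases List.mem_cons.mp hy with rfl | hy'
        · exact h
        · have := hp.1 (decide (y > val)) (List.mem_map.mpr ⟨y, hy', rfl⟩)
          rcases hd : decide (y > val) with _ | _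
          · rw [hd] at this; exact absurd this (by decide)
          · simpa using hd
    · rw [pvA_cons_le x xs val h]
      have hflag : decide (x > val) = false := by simpa using h
      simp only [List.map_cons, hflag, List.pairwise_cons]
      rw [ih]
      exact ⟨fun hp => ⟨fun b _ => Bool.false_le b, hp⟩, fun hp => hp.2⟩

-- B's result characterised the same way
lemma pvB_iff (lst : List Int) (val : Int) :
    is_partitioned_alt lst val = true ↔
      (lst.map (fun x => decide (x > val))).Pairwise (fun a b => a ≤ b) := by
  unfold is_partitioned_alt
  simp only [decide_eq_true_eq]
  constructor
  · intro hEq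
    have := PySem.List.sorted_pairwise (lst.map (fun x => decide (x > val))) (fun b => b)
    rw [← hEq] at this
    exact this
  · intro hp
    exact (PySem.List.sorted_eq_self_of_pairwise _ _ hp).symm

-- ===== VERDICT =====
theorem is_partitioned_spec : Claim_equal_is_partitioned := by
  intro lst val _
  unfold Spec_is_partitioned
  rcases hB : is_partitioned_alt lst val with _ | _
  · rcases hA : is_partitioned lst val with _ | _
    · rfl
    · exact absurd ((pvB_iff lst val).mpr ((pvA_iff lst val).mp hA)) (by simp [hB])
  · exact (pvA_iff lst val).mpr ((pvB_iff lst val).mp hB)
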